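-- pv_equiv track=rewrite | github.com/d-mali/k4s1_bioinformatika | 1darbas/main.py | codon_dicodon_frequency
-- ===== SOURCE A (Python) =====
-- from collections import defaultdict
--
-- def codon_dicodon_frequency(protein_sequences):
--     codon_count = defaultdict(int)
--     dicodon_count = defaultdict(int)
--
--     for protein in protein_sequences:
--         for i in range(0, len(protein), 1):
--             codon = protein[i:i+1]
--             codon_count[codon] += 1
--             if i + 1 < len(protein):
--                 dicodon = protein[i:i+2]
--                 dicodon_count[dicodon] += 1
--
--     return codon_count, dicodon_count
-- ===== SOURCE B (Python) =====
-- from collections import defaultdict, Counter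
--
--
-- def codon_dicodon_frequency(protein_sequences):
--     # Divide and conquer: count each sequence into its own pair of frequency
--     # tables, then merge tables pairwise up a binary tree.
--     def leaf(protein):
--         return (Counter(protein),
--                 Counter(map(''.join, zip(protein, protein[1:]))))
--
--     def merge(left, right):
--         mono, di = Counter(left[0]), Counter(left[1])
--         for k, v in right[0].items():
--             mono[k] += v
--         for k, v in right[1].items():
--             di[k] += v
--         return mono, di
--
--     def conquer(seqs):
--         if not seqs:
--             return Counter(), Counter()
--         if len(seqs) == 1:
--             return leaf(seqs[0])
--         mid = len(seqs) // 2
--         return merge(conquer(seqs[:mid]), conquer(seqs[mid:]))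
--
--     mono, di = conquer(protein_sequences)
--     return defaultdict(int, mono), defaultdict(int, di)
-- ===== Notes on version B (the rewrite author's own statement) =====
-- stated objective: alternative
-- what changed: Replaces A's single interleaved index-and-slice loop with a divide-and-conquer: each sequence is counted into its own pair of frequency tables (Counter of chars, Counter of joined zip pairs) and the tables are merged pairwise up a binary tree of list halves.
import Mathlib
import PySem

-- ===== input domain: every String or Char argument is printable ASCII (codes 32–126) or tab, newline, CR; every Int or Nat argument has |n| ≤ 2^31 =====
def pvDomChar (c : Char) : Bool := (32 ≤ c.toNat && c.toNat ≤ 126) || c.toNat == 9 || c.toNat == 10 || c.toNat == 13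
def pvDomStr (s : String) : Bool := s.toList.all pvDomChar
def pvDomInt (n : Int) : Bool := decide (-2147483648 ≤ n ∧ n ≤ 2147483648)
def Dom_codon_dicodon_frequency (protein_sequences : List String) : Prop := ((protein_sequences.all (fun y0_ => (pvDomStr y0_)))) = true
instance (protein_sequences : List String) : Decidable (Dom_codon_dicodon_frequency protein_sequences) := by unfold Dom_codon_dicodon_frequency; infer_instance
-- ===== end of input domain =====

-- B replaces A's single interleaved index/slice loop by divide and conquer: each sequence is
-- counted into its own pair of frequency tables, merged pairwise up a binary tree of list halves.
-- Same asymptotic cost ('alternative'); return value proved identical, including insertion order.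

-- ===== PORT A =====
-- literal port of A: one loop over sequences, inner index loop slicing protein[i:i+1] / protein[i:i+2],
-- incrementing two defaultdict(int)s (d[k] += 1 on a defaultdict = modify k 0 (· + 1)).
def codon_dicodon_frequency (protein_sequences : List String) : (List (String × Int)) × (List (String × Int)) :=
  let st := protein_sequences.foldl
    (fun (st : PySem.Dict String Int × PySem.Dict String Int) protein =>
      (PySem.List.pyRange 0 (PySem.Str.len protein) 1).foldl
        (fun st i =>
          let codon := PySem.Str.slice protein (some i) (some (i + 1))
          let codon_count := st.1.modify codon 0 (· + 1)
          if i + 1 < PySem.Str.len protein then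
            let dicodon := PySem.Str.slice protein (some i) (some (i + 2))
            (codon_count, st.2.modify dicodon 0 (· + 1))
          else
            (codon_count, st.2)) st)
    (PySem.Dict.empty, PySem.Dict.empty)
  (st.1.items, st.2.items)

-- ===== PORT B =====
-- leaf(protein): Counter over the characters, Counter over ''.join of zip(protein, protein[1:])
def cdfLeaf (protein : String) : PySem.Dict String Int × PySem.Dict String Int :=
  (PySem.Dict.counter (protein.toList.map (fun ch => String.ofList [ch])),
   PySem.Dict.counter
     ((protein.toList.zip (PySem.Str.slice protein (some 1) none).toList).map
       (fun ab => String.ofList [ab.1, ab.2])))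

-- 'out = Counter(c); for k, v in r.items(): out[k] += v' (Counter copy of a Counter is the identity on items)
def cdfMergeD (d e : PySem.Dict String Int) : PySem.Dict String Int :=
  e.items.foldl (fun d p => d.modify p.1 0 (· + p.2)) d

def cdfMerge (l r : PySem.Dict String Int × PySem.Dict String Int) :
    PySem.Dict String Int × PySem.Dict String Int :=
  (cdfMergeD l.1 r.1, cdfMergeD l.2 r.2)

-- conquer(seqs): empty → empty Counters; singleton → leaf; else merge the two halves
-- (len(seqs) // 2 on the Nat length is Nat division: PySem.Int.floordiv_natCast)
def cdfConquer (seqs : List String) : PySem.Dict String Int × PySem.Dict String Int :=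
  if h0 : seqs = [] then (PySem.Dict.empty, PySem.Dict.empty)
  else if h1 : seqs.length = 1 then cdfLeaf (PySem.List.pyGetD seqs 0 "")
  else
    let mid := seqs.length / 2
    cdfMerge (cdfConquer (PySem.List.slice seqs none (some (mid : Int))))
             (cdfConquer (PySem.List.slice seqs (some (mid : Int)) none))
termination_by seqs.length
decreasing_by
  · rw [PySem.List.slice_to_natCast]
    have : seqs.length ≠ 0 := by simpa using h0
    simp only [List.length_take]
    omega
  · rw [PySem.List.slice_from_natCast]
    have : seqs.length ≠ 0 := by simpa using h0
    simp only [List.length_drop]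
    omega

def codon_dicodon_frequency_alt (protein_sequences : List String) : (List (String × Int)) × (List (String × Int)) :=
  let r := cdfConquer protein_sequences
  (r.1.items, r.2.items)

-- ===== PRECONDITION & SPEC =====
def Spec_codon_dicodon_frequency (protein_sequences : List String) (out : (List (String × Int)) × (List (String × Int))) : Prop := out = codon_dicodon_frequency_alt protein_sequences
instance (protein_sequences : List String) (out : (List (String × Int)) × (List (String × Int))) : Decidable (Spec_codon_dicodon_frequency protein_sequences out) := by unfold Spec_codon_dicodon_frequency; infer_instance

-- ===== CLAIM (what is proved, stated in full; the proofs are below) =====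
def Claim_equal_codon_dicodon_frequency : Prop := ∀ (protein_sequences : List String), Dom_codon_dicodon_frequency protein_sequences → Spec_codon_dicodon_frequency protein_sequences (codon_dicodon_frequency protein_sequences)

-- ===== LEMMAS AND PROOFS =====

-- the shared per-key update of A's loop
def pvUpd (d : PySem.Dict String Int) (x : String) : PySem.Dict String Int := d.modify x 0 (· + 1)

-- the two flattened streams both programs count
def pvS1 (ps : List String) : List String :=
  ps.flatMap (fun p => p.toList.map (fun ch => String.ofList [ch]))
def pvS2 (ps : List String) : List String :=
  ps.flatMap (fun p => (p.toList.zip p.toList.tail).map (fun ab => String.ofList [ab.1, ab.2]))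

-- A's inner-loop body, phrased over the character list
def pvBody (cs : List Char) (st : PySem.Dict String Int × PySem.Dict String Int) (i : Int) :
    PySem.Dict String Int × PySem.Dict String Int :=
  let codon := String.ofList (PySem.List.slice cs (some i) (some (i + 1)))
  let codon_count := pvUpd st.1 codon
  if i + 1 < (cs.length : Int) then
    (codon_count, pvUpd st.2 (String.ofList (PySem.List.slice cs (some i) (some (i + 2)))))
  else
    (codon_count, st.2)

-- A's Str.slice result, seen as a list-level slice
theorem pvStrSlice_eq (s : String) (a b : Option Int) :
    PySem.Str.slice s a b = String.ofList (PySem.List.slice s.toList a b) := by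
  rw [← String.ofList_toList (s := PySem.Str.slice s a b), PySem.Str.toList_slice]
  simp

-- shifting the body one character to the right
theorem pvBody_shift (c : Char) (cs : List Char) (st : PySem.Dict String Int × PySem.Dict String Int)
    (k : Nat) : pvBody (c :: cs) st ((k : Int) + 1) = pvBody cs st (k : Int) := by
  have h1 : (0:Int) ≤ (k : Int) + 1 := by positivity
  have h3 : (0:Int) ≤ (k : Int) := by positivity
  unfold pvBody
  rw [PySem.List.slice_toNat _ h1 (by positivity), PySem.List.slice_toNat _ h3 (by positivity),
      PySem.List.slice_toNat _ h1 (by positivity), PySem.List.slice_toNat _ h3 (by positivity)]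
  have e1 : ((k : Int) + 1).toNat = k + 1 := by omega
  have e2 : ((k : Int) + 1 + 1).toNat = k + 2 := by omega
  have e3 : ((k : Int)).toNat = k := by omega
  have e4 : ((k : Int) + 2).toNat = k + 2 := by omega
  rw [e1, e2, e3, e4]
  have hc : ((k : Int) + 1 + 1 < ((c :: cs).length : Int)) ↔ ((k : Int) + 1 < (cs.length : Int)) := by
    simp only [List.length_cons]; push_cast; omega
  have e5 : ((k : Int) + 1 + 2).toNat - (k + 1) = 2 := by omega
  have e6 : k + 1 - k = 1 := by omega
  have e7 : k + 2 - (k + 1) = 1 := by omega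
  have e8 : k + 2 - k = 2 := by omega
  simp only [List.drop_succ_cons, e5, e6, e7, e8]
  rw [if_congr hc rfl rfl]

-- the shifted tail of the inner loop over c :: cs is the inner loop over cs
theorem pvInner_shift (c : Char) (cs : List Char) (st : PySem.Dict String Int × PySem.Dict String Int) :
    (PySem.List.pyRange 1 ((cs.length : Int) + 1) 1).foldl (pvBody (c :: cs)) st
      = (PySem.List.pyRange 0 (cs.length : Int) 1).foldl (pvBody cs) st := by
  rw [PySem.List.pyRange_one 1 ((cs.length : Int) + 1), PySem.List.pyRange_one 0 (cs.length : Int)]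
  have e1 : ((cs.length : Int) + 1 - 1).toNat = cs.length := by omega
  have e2 : ((cs.length : Int) - 0).toNat = cs.length := by omega
  rw [e1, e2, List.foldl_map, List.foldl_map]
  apply PySem.List.foldl_congr_mem
  intro acc k _
  have : (1 : Int) + (k : Int) = (k : Int) + 1 := by ring
  rw [this, pvBody_shift]
  simp

-- main per-sequence lemma: the interleaved index loop splits into two independent folds
theorem pvInner_split (cs : List Char) (st : PySem.Dict String Int × PySem.Dict String Int) :
    (PySem.List.pyRange 0 (cs.length : Int) 1).foldl (pvBody cs) st
      = ((cs.map (fun ch => String.ofList [ch])).foldl pvUpd st.1,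
         ((cs.zip cs.tail).map (fun ab => String.ofList [ab.1, ab.2])).foldl pvUpd st.2) := by
  induction cs generalizing st with
  | nil => simp [PySem.List.pyRange_one_eq_nil]
  | cons c cs ih =>
    have hn : ((c :: cs).length : Int) = (cs.length : Int) + 1 := by simp
    rw [hn, PySem.List.pyRange_one_cons (by positivity), List.foldl_cons,
        show (0:Int) + 1 = 1 from rfl, pvInner_shift, ih]
    cases cs with
    | nil =>
      simp [pvBody, PySem.List.slice_toNat (a := (0:Int)) (b := (1:Int)) _ (by norm_num) (by norm_num)]
    | cons d ds =>
      have hcodon : PySem.List.slice (c :: d :: ds) none (some 1) = [c] := by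
        rw [PySem.List.slice_to _ (by norm_num)]; rfl
      have hdic : PySem.List.slice (c :: d :: ds) none (some 2) = [c, d] := by
        rw [PySem.List.slice_to _ (by norm_num)]; rfl
      have hif : ((0:Int) + 1 < (((c :: d :: ds).length : Nat) : Int)) := by simp
      simp [pvBody, hcodon, hdic]

-- A's inner loop over the string equals the list-level loop
theorem pvInner_str (s : String) (st : PySem.Dict String Int × PySem.Dict String Int) :
    (PySem.List.pyRange 0 (PySem.Str.len s) 1).foldl
      (fun st i =>
        let codon := PySem.Str.slice s (some i) (some (i + 1))
        let codon_count := st.1.modify codon 0 (· + 1)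
        if i + 1 < PySem.Str.len s then
          let dicodon := PySem.Str.slice s (some i) (some (i + 2))
          (codon_count, st.2.modify dicodon 0 (· + 1))
        else
          (codon_count, st.2)) st
      = (PySem.List.pyRange 0 (s.toList.length : Int) 1).foldl (pvBody s.toList) st := by
  rw [PySem.Str.len_eq]
  apply PySem.List.foldl_congr_mem
  intro acc i _
  simp only [pvBody, pvUpd, pvStrSlice_eq]

-- the whole loop of A, split into the two flatMap folds
theorem pvOuter (ps : List String) (st : PySem.Dict String Int × PySem.Dict String Int) :
    ps.foldl
      (fun st protein =>
        (PySem.List.pyRange 0 (PySem.Str.len protein) 1).foldl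
          (fun st i =>
            let codon := PySem.Str.slice protein (some i) (some (i + 1))
            let codon_count := st.1.modify codon 0 (· + 1)
            if i + 1 < PySem.Str.len protein then
              let dicodon := PySem.Str.slice protein (some i) (some (i + 2))
              (codon_count, st.2.modify dicodon 0 (· + 1))
            else
              (codon_count, st.2)) st) st
      = ((pvS1 ps).foldl pvUpd st.1, (pvS2 ps).foldl pvUpd st.2) := by
  induction ps generalizing st with
  | nil => simp [pvS1, pvS2]
  | cons p ps ih =>
    simp only [List.foldl_cons, pvS1, pvS2, List.flatMap_cons]
    rw [pvInner_str, pvInner_split, ih]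
    simp [pvS1, pvS2, List.foldl_append]

-- ======== B-side lemmas ========

-- value of the merge loop at any key, as a filtered sum over the merged items
theorem pvGetD_merge_fold (pairs : List (String × Int)) (d : PySem.Dict String Int) (k : String) :
    (pairs.foldl (fun d p => d.modify p.1 0 (· + p.2)) d).getD k 0
      = d.getD k 0 + ((pairs.filter (fun p => decide (p.1 = k))).map (·.2)).sum := by
  induction pairs generalizing d with
  | nil => simp
  | cons p ps ih =>
    rw [List.foldl_cons, ih, PySem.Dict.getD_modify]
    by_cases h : p.1 = k
    · simp [h]; ring
    · simp [h, Ne.symm h]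

-- filtering a Nodup list for one element
theorem pvFilter_nodup (s : List String) (k : String) (h : s.Nodup) :
    s.filter (fun j => decide (j = k)) = if k ∈ s then [k] else [] := by
  induction s with
  | nil => simp
  | cons a s ih =>
    rcases List.nodup_cons.mp h with ⟨ha, hs⟩
    by_cases hak : a = k
    · subst hak
      simp [ih hs, ha]
    · simp [hak, ih hs, Ne.symm hak]

-- the filtered sum over a counter's items is the count
theorem pvSum_filter_counter (ys : List String) (k : String) :
    ((((PySem.Dict.counter ys).items).filter (fun p => decide (p.1 = k))).map (·.2)).sum
      = (ys.count k : Int) := by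
  rw [PySem.Dict.items_counter, List.filter_map]
  have hc : ((fun p : String × Int => decide (p.1 = k)) ∘ (fun j => (j, (ys.count j : Int))))
      = fun j => decide (j = k) := rfl
  rw [hc, pvFilter_nodup _ _ (PySem.Set.nodup_ofList ys)]
  by_cases hk : k ∈ ys
  · simp [PySem.Set.mem_ofList, hk]
  · simp [PySem.Set.mem_ofList, hk, List.count_eq_zero_of_not_mem hk]

-- updating with the dedup of a list is updating with the list
theorem pvUpdate_ofList (s : PySem.Set String) (ys : List String) :
    s.update (PySem.Set.ofList ys) = s.update ys := by
  rw [PySem.Set.update_eq_append_filter, PySem.Set.update_eq_append_filter,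
      PySem.Set.ofList_ofList]

-- merging Counter(ys) into Counter(xs) is Counter(xs ++ ys), insertion order included
theorem pvMergeD_counter (xs ys : List String) :
    cdfMergeD (PySem.Dict.counter xs) (PySem.Dict.counter ys)
      = PySem.Dict.counter (xs ++ ys) := by
  have hndL : (cdfMergeD (PySem.Dict.counter xs) (PySem.Dict.counter ys)).keys.Nodup := by
    unfold cdfMergeD
    exact PySem.Dict.nodup_keys_foldl_modify_key _ (Prod.fst : String × Int → String) 0
      (fun _ p v => v + p.2) _ (PySem.Dict.nodup_keys_counter xs)
  have hkeys : (cdfMergeD (PySem.Dict.counter xs) (PySem.Dict.counter ys)).keys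
      = (PySem.Dict.counter (xs ++ ys)).keys := by
    unfold cdfMergeD
    rw [PySem.Dict.keys_foldl_modify_key _ (Prod.fst : String × Int → String) 0
      (fun _ p v => v + p.2)]
    have hmap : ((PySem.Dict.counter ys).items.map Prod.fst) = (PySem.Dict.counter ys).keys := rfl
    rw [hmap, PySem.Dict.keys_counter, PySem.Dict.keys_counter, PySem.Dict.keys_counter,
        pvUpdate_ofList, PySem.Set.ofList_append]
  apply PySem.Dict.ext
  rw [PySem.Dict.items_eq_map_keys _ hndL 0,
      PySem.Dict.items_eq_map_keys _ (PySem.Dict.nodup_keys_counter (xs ++ ys)) 0, hkeys]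
  apply List.map_congr_left
  intro k _
  have hv : (cdfMergeD (PySem.Dict.counter xs) (PySem.Dict.counter ys)).getD k 0
      = (PySem.Dict.counter (xs ++ ys)).getD k 0 := by
    unfold cdfMergeD
    rw [pvGetD_merge_fold, pvSum_filter_counter, PySem.Dict.getD_counter, PySem.Dict.getD_counter]
    push_cast [List.count_append]
    ring
  rw [hv]

-- B's divide and conquer computes the two global counters
theorem pvConquer_eq (seqs : List String) :
    cdfConquer seqs = (PySem.Dict.counter (pvS1 seqs), PySem.Dict.counter (pvS2 seqs)) := by
  induction seqs using cdfConquer.induct with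
  | case1 => simp [cdfConquer, pvS1, pvS2]; rfl
  | case2 seqs h0 h1 =>
    obtain ⟨s, rfl⟩ : ∃ s, seqs = [s] := by
      cases seqs with
      | nil => simp at h1
      | cons a t => cases t with
        | nil => exact ⟨a, rfl⟩
        | cons b u => simp at h1
    rw [cdfConquer]
    simp only [reduceDIte, List.cons_ne_self]
    simp [cdfLeaf, pvS1, pvS2, PySem.Str.toList_slice, PySem.List.slice_from_one]
  | case3 seqs h0 h1 mid ih1 ih2 =>
    rw [cdfConquer]
    simp only [h0, h1, dite_false]
    rw [ih1, ih2]
    unfold cdfMerge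
    simp only
    rw [pvMergeD_counter, pvMergeD_counter,
        PySem.List.slice_to_natCast, PySem.List.slice_from_natCast]
    have e1 : pvS1 (List.take mid seqs) ++ pvS1 (List.drop mid seqs) = pvS1 seqs := by
      rw [pvS1, pvS1, pvS1, ← List.flatMap_append, List.take_append_drop]
    have e2 : pvS2 (List.take mid seqs) ++ pvS2 (List.drop mid seqs) = pvS2 seqs := by
      rw [pvS2, pvS2, pvS2, ← List.flatMap_append, List.take_append_drop]
    rw [e1, e2]

-- ===== VERDICT (by name: the statement is the Claim_ definition above) =====
theorem codon_dicodon_frequency_spec : Claim_equal_codon_dicodon_frequency := by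
  intro ps _
  unfold Spec_codon_dicodon_frequency codon_dicodon_frequency codon_dicodon_frequency_alt
  rw [pvOuter, pvConquer_eq]
  rw [PySem.Dict.counter_eq_foldl, PySem.Dict.counter_eq_foldl]
  rfl
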